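-- pv_equiv track=rewrite | github.com/ankitshah009/leetcode_python | graphs/1950-maximum_of_minimum_values_in_all_subarrays.py | findMaximums
-- ===== SOURCE A (Python) =====
-- from typing import List
--
-- def findMaximums(nums: List[int]) -> List[int]:
--     """
--     Monotonic stack to find range where each element is minimum.
--     """
--     n = len(nums)
--
--     # Find previous smaller element index
--     prev_smaller = [-1] * n
--     stack = []
--     for i in range(n):
--         while stack and nums[stack[-1]] >= nums[i]:
--             stack.pop()
--         if stack:
--             prev_smaller[i] = stack[-1]
--         stack.append(i)
--
--     # Find next smaller element index
--     next_smaller = [n] * n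
--     stack = []
--     for i in range(n - 1, -1, -1):
--         while stack and nums[stack[-1]] >= nums[i]:
--             stack.pop()
--         if stack:
--             next_smaller[i] = stack[-1]
--         stack.append(i)
--
--     # For each element, it's minimum in window of size (next - prev - 1)
--     result = [0] * n
--
--     for i in range(n):
--         window_size = next_smaller[i] - prev_smaller[i] - 1
--         result[window_size - 1] = max(result[window_size - 1], nums[i])
--
--     # Fill gaps: answer for smaller window >= answer for larger window
--     for i in range(n - 2, -1, -1):
--         result[i] = max(result[i], result[i + 1])
--
--     return result
-- ===== SOURCE B (Python) =====
-- from typing import List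
--
-- def findMaximums(nums: List[int]) -> List[int]:
--     """Pointer-jumping (no stack): each boundary search reuses earlier answers;
--     suffix maxima built in one reversed scan instead of in-place updates."""
--     n = len(nums)
--
--     # previous strictly-smaller index via pointer jumping over prev_s itself
--     prev_s = [-1] * n
--     for i in range(n):
--         j = i - 1
--         while j >= 0 and nums[j] >= nums[i]:
--             j = prev_s[j]
--         prev_s[i] = j
--
--     # next strictly-smaller index via pointer jumping over next_s itself
--     next_s = [n] * n
--     for i in range(n - 1, -1, -1):
--         j = i + 1
--         while j < n and nums[j] >= nums[i]:
--             j = next_s[j]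
--         next_s[i] = j
--
--     # bucket the best candidate per window size
--     best = [0] * n
--     for i in range(n):
--         w = next_s[i] - prev_s[i] - 1
--         best[w - 1] = max(best[w - 1], nums[i])
--
--     # suffix maxima in one reversed scan
--     out = []
--     run = None
--     for v in reversed(best):
--         run = v if run is None else max(run, v)
--         out.append(run)
--     out.reverse()
--     return out
-- ===== Notes on version B (the rewrite author's own statement) =====
-- stated objective: alternative
-- what changed: The two monotonic stacks are replaced by pointer jumping over the prev_s/next_s boundary arrays themselves (no stack is maintained), and the final in-place backward gap-fill loop is replaced by a single reversed scan with a running maximum that builds a new output list.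
import Mathlib
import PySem

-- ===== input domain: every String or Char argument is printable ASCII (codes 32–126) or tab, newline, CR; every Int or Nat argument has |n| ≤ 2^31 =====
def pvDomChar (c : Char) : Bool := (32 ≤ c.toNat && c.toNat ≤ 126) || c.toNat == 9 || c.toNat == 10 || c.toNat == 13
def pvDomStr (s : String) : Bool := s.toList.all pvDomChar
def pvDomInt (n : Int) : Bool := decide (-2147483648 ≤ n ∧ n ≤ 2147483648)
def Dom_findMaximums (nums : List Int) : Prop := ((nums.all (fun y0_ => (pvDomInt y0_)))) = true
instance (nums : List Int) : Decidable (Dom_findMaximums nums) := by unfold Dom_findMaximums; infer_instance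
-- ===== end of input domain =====

-- B replaces A's two monotonic stacks by pointer jumping over the boundary arrays themselves and
-- builds the suffix maxima in one reversed scan; objective: alternative (similar cost, no stack).

-- ===== PORT A =====
-- Python `while stack and nums[stack[-1]] >= nums[i]: stack.pop()`; the stack top is the list head.
def pvPopA (nums : List Int) (x : Int) : List Nat → List Nat
  | [] => []
  | j :: s => if nums.getD j 0 ≥ x then pvPopA nums x s else j :: s

-- one iteration of A's (textually identical) stack loops: pop, read the new top, push i.
-- loop indices from `range n` are always in range, so `getD`/`set` are exact for nums[i] / arr[i] = v.
def pvStepA (nums : List Int) (st : List Int × List Nat) (i : Nat) : List Int × List Nat :=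
  let s := pvPopA nums (nums.getD i 0) st.2
  (match s with
   | [] => st.1
   | j :: _ => st.1.set i (j : Int), i :: s)

-- the bucket loop, textually identical in A and B: result[w-1] = max(result[w-1], nums[i]);
-- w = next-prev-1 always lies in [1, n] (prev < i < next), so the index (w-1).toNat is exact.
def pvBucketStep (nums prevS nextS : List Int) (r : List Int) (i : Nat) : List Int :=
  let w := nextS.getD i 0 - prevS.getD i 0 - 1
  r.set (w - 1).toNat (max (r.getD (w - 1).toNat 0) (nums.getD i 0))

def pvBuckets (nums prevS nextS : List Int) : List Int :=
  (List.range nums.length).foldl (pvBucketStep nums prevS nextS) (List.replicate nums.length 0)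

-- A's final gap fill: for i in range(n-2,-1,-1): result[i] = max(result[i], result[i+1]).
def pvFillStepA (r : List Int) (i : Nat) : List Int :=
  r.set i (max (r.getD i 0) (r.getD (i + 1) 0))

def findMaximums (nums : List Int) : List Int :=
  let n := nums.length
  let prevS := ((List.range n).foldl (pvStepA nums) (List.replicate n (-1), [])).1
  let nextS := ((List.range n).reverse.foldl (pvStepA nums) (List.replicate n (n : Int), [])).1
  let res := pvBuckets nums prevS nextS
  (List.range (n - 1)).reverse.foldl pvFillStepA res

-- ===== PORT B =====
-- Python `j = i-1; while j >= 0 and nums[j] >= nums[i]: j = prev_s[j]`; the visited links strictly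
-- decrease, so `nums.length` fuel always lets the while loop run to completion.
def pvJumpP (nums ps : List Int) (x j : Int) : Nat → Int
  | 0 => j
  | fuel + 1 =>
      if 0 ≤ j ∧ nums.getD j.toNat 0 ≥ x then pvJumpP nums ps x (ps.getD j.toNat (-1)) fuel else j

-- Python `j = i+1; while j < n and nums[j] >= nums[i]: j = next_s[j]`; links strictly increase.
def pvJumpN (nums ns : List Int) (x j : Int) : Nat → Int
  | 0 => j
  | fuel + 1 =>
      if j < (nums.length : Int) ∧ nums.getD j.toNat 0 ≥ x then
        pvJumpN nums ns x (ns.getD j.toNat (nums.length : Int)) fuel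
      else j

def pvPrevStepB (nums ps : List Int) (i : Nat) : List Int :=
  ps.set i (pvJumpP nums ps (nums.getD i 0) ((i : Int) - 1) nums.length)

def pvNextStepB (nums ns : List Int) (i : Nat) : List Int :=
  ns.set i (pvJumpN nums ns (nums.getD i 0) ((i : Int) + 1) nums.length)

-- one reversed scan: run = v if run is None else max(run, v); out.append(run); finally out.reverse().
def pvScanStepB (st : Option Int × List Int) (v : Int) : Option Int × List Int :=
  let r := match st.1 with | none => v | some m => max m v
  (some r, st.2 ++ [r])

def pvScanB (best : List Int) : List Int :=
  (best.reverse.foldl pvScanStepB (none, [])).2.reverse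

def findMaximums_alt (nums : List Int) : List Int :=
  let prevS := (List.range nums.length).foldl (pvPrevStepB nums) (List.replicate nums.length (-1))
  let nextS := (List.range nums.length).reverse.foldl (pvNextStepB nums)
      (List.replicate nums.length (nums.length : Int))
  pvScanB (pvBuckets nums prevS nextS)

-- ===== PRECONDITION & SPEC =====
def Spec_findMaximums (nums : List Int) (out : List Int) : Prop := out = findMaximums_alt nums
instance (nums : List Int) (out : List Int) : Decidable (Spec_findMaximums nums out) := by unfold Spec_findMaximums; infer_instance

-- ===== CLAIM (what is proved, stated in full; the proofs are below) =====
def Claim_equal_findMaximums : Prop := ∀ (nums : List Int), Dom_findMaximums nums → Spec_findMaximums nums (findMaximums nums)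

-- ===== LEMMAS AND PROOFS =====

-- getD/set bookkeeping
theorem pv_getD_set_ne (l : List Int) (i j : Nat) (v d : Int) (h : i ≠ j) :
    (l.set i v).getD j d = l.getD j d := by
  simp [List.getD_eq_getElem?_getD, h]

theorem pv_getD_set_self (l : List Int) (i : Nat) (v d : Int) (h : i < l.length) :
    (l.set i v).getD i d = v := by
  simp [List.getD_eq_getElem?_getD, h]

theorem pv_set_getD_self (l : List Int) (i : Nat) (d : Int) (h : i < l.length) :
    l.set i (l.getD i d) = l := by
  simp [List.getD_eq_getElem?_getD, h]

theorem pv_getD_replicate (n k : Nat) (v d : Int) :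
    (List.replicate n v).getD k d = if k < n then v else d := by
  by_cases h : k < n <;> simp [List.getD_eq_getElem?_getD, h]

-- the descending chain of stored previous-boundary links, as a list of indices (head = start)
def pvChainP (ps : List Int) : Int → Nat → List Nat
  | _, 0 => []
  | j, f + 1 => if 0 ≤ j then j.toNat :: pvChainP ps (ps.getD j.toNat (-1)) f else []

-- the ascending chain of stored next-boundary links
def pvChainN (ns : List Int) (nn : Nat) : Int → Nat → List Nat
  | _, 0 => []
  | j, f + 1 => if j < (nn : Int) then j.toNat :: pvChainN ns nn (ns.getD j.toNat (nn : Int)) f else []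

theorem pvChainP_neg (ps : List Int) (j : Int) (f : Nat) (h : j < 0) : pvChainP ps j f = [] := by
  have h' : ¬ (0 ≤ j) := by omega
  cases f
  · simp [pvChainP]
  · simp [pvChainP, h']

theorem pvChainN_big (ns : List Int) (nn : Nat) (j : Int) (f : Nat) (h : (nn : Int) ≤ j) :
    pvChainN ns nn j f = [] := by
  have h' : ¬ (j < (nn : Int)) := by omega
  cases f <;> simp [pvChainN, h']

theorem pvChainP_unfold (ps : List Int) (j : Int) (f : Nat) (hf : 1 ≤ f) (h : 0 ≤ j) :
    pvChainP ps j f = j.toNat :: pvChainP ps (ps.getD j.toNat (-1)) (f - 1) := by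
  obtain ⟨f', rfl⟩ : ∃ f', f = f' + 1 := ⟨f - 1, by omega⟩
  simp only [pvChainP, if_pos h, Nat.add_sub_cancel]

theorem pvChainN_unfold (ns : List Int) (nn : Nat) (j : Int) (f : Nat) (hf : 1 ≤ f)
    (h : j < (nn : Int)) :
    pvChainN ns nn j f = j.toNat :: pvChainN ns nn (ns.getD j.toNat (nn : Int)) (f - 1) := by
  obtain ⟨f', rfl⟩ : ∃ f', f = f' + 1 := ⟨f - 1, by omega⟩
  simp only [pvChainN, if_pos h, Nat.add_sub_cancel]

theorem pvJumpP_le (nums ps : List Int) (x : Int) (hwf : ∀ k : Nat, ps.getD k (-1) < (k : Int)) :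
    ∀ (f : Nat) (j : Int), pvJumpP nums ps x j f ≤ j := by
  intro f
  induction f with
  | zero => intro j; simp [pvJumpP]
  | succ f ih =>
      intro j
      by_cases h : 0 ≤ j ∧ nums.getD j.toNat 0 ≥ x
      · have h1 : ps.getD j.toNat (-1) < (j.toNat : Int) := hwf j.toNat
        have h2 : (j.toNat : Int) = j := Int.toNat_of_nonneg h.1
        have h3 := ih (ps.getD j.toNat (-1))
        simp only [pvJumpP, if_pos h]
        omega
      · simp only [pvJumpP, if_neg h]
        omega

theorem pvJumpP_lb (nums ps : List Int) (x : Int) (hlb : ∀ k : Nat, -1 ≤ ps.getD k (-1)) :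
    ∀ (f : Nat) (j : Int), -1 ≤ j → -1 ≤ pvJumpP nums ps x j f := by
  intro f
  induction f with
  | zero => intro j hj; simpa [pvJumpP] using hj
  | succ f ih =>
      intro j hj
      by_cases h : 0 ≤ j ∧ nums.getD j.toNat 0 ≥ x
      · simp only [pvJumpP, if_pos h]
        exact ih _ (hlb j.toNat)
      · simp only [pvJumpP, if_neg h]
        exact hj

theorem pvChainP_congr (ps : List Int) (hwf : ∀ k : Nat, ps.getD k (-1) < (k : Int)) :
    ∀ (f₁ f₂ : Nat) (j : Int), j < (f₁ : Int) → j < (f₂ : Int) →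
      pvChainP ps j f₁ = pvChainP ps j f₂ := by
  intro f₁
  induction f₁ with
  | zero =>
      intro f₂ j h1 _
      rw [pvChainP_neg ps j _ (by exact_mod_cast h1), pvChainP_neg ps j _ (by exact_mod_cast h1)]
  | succ f₁ ih =>
      intro f₂ j h1 h2
      by_cases hj : 0 ≤ j
      · obtain ⟨g, rfl⟩ : ∃ g, f₂ = g + 1 := ⟨f₂ - 1, by omega⟩
        have hrec := hwf j.toNat
        have h2' : (j.toNat : Int) = j := Int.toNat_of_nonneg hj
        simp only [pvChainP, if_pos hj]
        rw [ih g (ps.getD j.toNat (-1)) (by omega) (by omega)]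
      · rw [pvChainP_neg ps j _ (by omega), pvChainP_neg ps j _ (by omega)]

theorem pvPopA_chainP (nums ps : List Int) (x : Int)
    (hwf : ∀ k : Nat, ps.getD k (-1) < (k : Int)) :
    ∀ (f : Nat) (j : Int), j < (f : Int) →
      pvPopA nums x (pvChainP ps j f) = pvChainP ps (pvJumpP nums ps x j f) f := by
  intro f
  induction f with
  | zero => intro j _; simp [pvChainP, pvPopA]
  | succ f ih =>
      intro j hj
      by_cases h0 : 0 ≤ j
      · have hbd := hwf j.toNat
        have htn : (j.toNat : Int) = j := Int.toNat_of_nonneg h0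
        simp only [pvChainP, if_pos h0]
        by_cases hc : nums.getD j.toNat 0 ≥ x
        · have hcond : 0 ≤ j ∧ nums.getD j.toNat 0 ≥ x := ⟨h0, hc⟩
          simp only [pvPopA, if_pos hc]
          rw [ih (ps.getD j.toNat (-1)) (by omega)]
          rw [show pvJumpP nums ps x j (f + 1) = pvJumpP nums ps x (ps.getD j.toNat (-1)) f from by
            simp only [pvJumpP, if_pos hcond]]
          have hle := pvJumpP_le nums ps x hwf f (ps.getD j.toNat (-1))
          exact pvChainP_congr ps hwf f (f + 1) _ (by omega) (by omega)
        · have hcond : ¬ (0 ≤ j ∧ nums.getD j.toNat 0 ≥ x) := fun hh => hc hh.2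
          simp only [pvPopA, if_neg hc, pvJumpP, if_neg hcond]
          rw [if_pos h0]
      · have hcond : ¬ (0 ≤ j ∧ nums.getD j.toNat 0 ≥ x) := fun hh => h0 hh.1
        rw [pvChainP_neg ps j _ (by omega)]
        simp only [pvPopA, pvJumpP, if_neg hcond]
        rw [pvChainP_neg ps j _ (by omega)]

theorem pvChainP_set (ps : List Int) (i : Nat) (v : Int)
    (hwf : ∀ k : Nat, ps.getD k (-1) < (k : Int)) :
    ∀ (f : Nat) (j : Int), j < (i : Int) →
      pvChainP (ps.set i v) j f = pvChainP ps j f := by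
  intro f
  induction f with
  | zero => intro j _; rfl
  | succ f ih =>
      intro j hj
      by_cases h0 : 0 ≤ j
      · have htn : (j.toNat : Int) = j := Int.toNat_of_nonneg h0
        have hne : i ≠ j.toNat := by omega
        have hbd := hwf j.toNat
        simp only [pvChainP, if_pos h0]
        rw [pv_getD_set_ne ps i j.toNat v (-1) hne, ih (ps.getD j.toNat (-1)) (by omega)]
      · rw [pvChainP_neg _ j _ (by omega), pvChainP_neg _ j _ (by omega)]

theorem pvJumpN_ge (nums ns : List Int) (x : Int)
    (hub : ∀ k : Nat, k < nums.length → (k : Int) < ns.getD k (nums.length : Int)) :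
    ∀ (f : Nat) (j : Int), 0 ≤ j → j ≤ pvJumpN nums ns x j f := by
  intro f
  induction f with
  | zero => intro j _; simp [pvJumpN]
  | succ f ih =>
      intro j h0
      by_cases h : j < (nums.length : Int) ∧ nums.getD j.toNat 0 ≥ x
      · have htn : (j.toNat : Int) = j := Int.toNat_of_nonneg h0
        have hub' := hub j.toNat (by omega)
        have h3 := ih (ns.getD j.toNat (nums.length : Int)) (by omega)
        simp only [pvJumpN, if_pos h]
        omega
      · simp only [pvJumpN, if_neg h]
        omega

theorem pvJumpN_le (nums ns : List Int) (x : Int)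
    (hub2 : ∀ k : Nat, ns.getD k (nums.length : Int) ≤ (nums.length : Int)) :
    ∀ (f : Nat) (j : Int), j ≤ (nums.length : Int) → pvJumpN nums ns x j f ≤ (nums.length : Int) := by
  intro f
  induction f with
  | zero => intro j hj; simpa [pvJumpN] using hj
  | succ f ih =>
      intro j hj
      by_cases h : j < (nums.length : Int) ∧ nums.getD j.toNat 0 ≥ x
      · simp only [pvJumpN, if_pos h]
        exact ih _ (hub2 j.toNat)
      · simp only [pvJumpN, if_neg h]
        exact hj

theorem pvChainN_congr (ns : List Int) (nn : Nat)
    (hub : ∀ k : Nat, k < nn → (k : Int) < ns.getD k (nn : Int)) :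
    ∀ (f₁ f₂ : Nat) (j : Int), 0 ≤ j → nn - j.toNat ≤ f₁ → nn - j.toNat ≤ f₂ →
      pvChainN ns nn j f₁ = pvChainN ns nn j f₂ := by
  intro f₁
  induction f₁ with
  | zero =>
      intro f₂ j h0 h1 _
      have htn : (j.toNat : Int) = j := Int.toNat_of_nonneg h0
      rw [pvChainN_big ns nn j _ (by omega), pvChainN_big ns nn j _ (by omega)]
  | succ f₁ ih =>
      intro f₂ j h0 h1 h2
      by_cases hlt : j < (nn : Int)
      · have htn : (j.toNat : Int) = j := Int.toNat_of_nonneg h0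
        have hub' := hub j.toNat (by omega)
        obtain ⟨g, rfl⟩ : ∃ g, f₂ = g + 1 := ⟨f₂ - 1, by omega⟩
        simp only [pvChainN, if_pos hlt]
        rw [ih g (ns.getD j.toNat (nn : Int)) (by omega) (by omega) (by omega)]
      · rw [pvChainN_big ns nn j _ (by omega), pvChainN_big ns nn j _ (by omega)]

theorem pvPopA_chainN (nums ns : List Int) (x : Int)
    (hub : ∀ k : Nat, k < nums.length → (k : Int) < ns.getD k (nums.length : Int)) :
    ∀ (f : Nat) (j : Int), 0 ≤ j → nums.length - j.toNat ≤ f →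
      pvPopA nums x (pvChainN ns nums.length j f)
        = pvChainN ns nums.length (pvJumpN nums ns x j f) f := by
  intro f
  induction f with
  | zero =>
      intro j h0 h1
      have htn : (j.toNat : Int) = j := Int.toNat_of_nonneg h0
      rw [pvChainN_big ns nums.length j 0 (by omega)]
      simp only [pvPopA, pvJumpN]
      rw [pvChainN_big ns nums.length j 0 (by omega)]
  | succ f ih =>
      intro j h0 hf
      by_cases hlt : j < (nums.length : Int)
      · have htn : (j.toNat : Int) = j := Int.toNat_of_nonneg h0
        have hub' := hub j.toNat (by omega)
        simp only [pvChainN, if_pos hlt]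
        by_cases hc : nums.getD j.toNat 0 ≥ x
        · have hcond : j < (nums.length : Int) ∧ nums.getD j.toNat 0 ≥ x := ⟨hlt, hc⟩
          simp only [pvPopA, if_pos hc]
          rw [ih (ns.getD j.toNat (nums.length : Int)) (by omega) (by omega)]
          rw [show pvJumpN nums ns x j (f + 1)
                = pvJumpN nums ns x (ns.getD j.toNat (nums.length : Int)) f from by
            simp only [pvJumpN, if_pos hcond]]
          have hge := pvJumpN_ge nums ns x hub f (ns.getD j.toNat (nums.length : Int)) (by omega)
          exact pvChainN_congr ns nums.length hub f (f + 1) _ (by omega) (by omega) (by omega)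
        · have hcond : ¬ (j < (nums.length : Int) ∧ nums.getD j.toNat 0 ≥ x) := fun hh => hc hh.2
          simp only [pvPopA, if_neg hc, pvJumpN, if_neg hcond]
          rw [if_pos hlt]
      · have hcond : ¬ (j < (nums.length : Int) ∧ nums.getD j.toNat 0 ≥ x) := fun hh => hlt hh.1
        rw [pvChainN_big ns nums.length j _ (by omega)]
        simp only [pvPopA, pvJumpN, if_neg hcond]
        rw [pvChainN_big ns nums.length j _ (by omega)]

theorem pvChainN_set (ns : List Int) (nn : Nat) (i : Nat) (v : Int)
    (hub : ∀ k : Nat, k < nn → (k : Int) < ns.getD k (nn : Int)) :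
    ∀ (f : Nat) (j : Int), (i : Int) < j →
      pvChainN (ns.set i v) nn j f = pvChainN ns nn j f := by
  intro f
  induction f with
  | zero => intro j _; rfl
  | succ f ih =>
      intro j hj
      have h0 : 0 ≤ j := by omega
      by_cases hlt : j < (nn : Int)
      · have htn : (j.toNat : Int) = j := Int.toNat_of_nonneg h0
        have hne : i ≠ j.toNat := by omega
        have hub' := hub j.toNat (by omega)
        simp only [pvChainN, if_pos hlt]
        rw [pv_getD_set_ne ns i j.toNat v (nn : Int) hne, ih (ns.getD j.toNat (nn : Int)) (by omega)]
      · rw [pvChainN_big _ nn j _ (by omega), pvChainN_big _ nn j _ (by omega)]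

-- forward-pass invariant: A's (array, stack) equals B's array, with the stack = the chain from m-1
theorem pvPrevPass_inv (nums : List Int) :
    ∀ m : Nat, m ≤ nums.length →
      (((List.range m).foldl (pvStepA nums) (List.replicate nums.length (-1), [])).1
          = (List.range m).foldl (pvPrevStepB nums) (List.replicate nums.length (-1))) ∧
      (((List.range m).foldl (pvStepA nums) (List.replicate nums.length (-1), [])).2
          = pvChainP ((List.range m).foldl (pvPrevStepB nums) (List.replicate nums.length (-1)))
              ((m : Int) - 1) nums.length) ∧
      (∀ k : Nat, ((List.range m).foldl (pvPrevStepB nums) (List.replicate nums.length (-1))).getD k (-1) < (k : Int)) ∧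
      (∀ k : Nat, -1 ≤ ((List.range m).foldl (pvPrevStepB nums) (List.replicate nums.length (-1))).getD k (-1)) ∧
      ((List.range m).foldl (pvPrevStepB nums) (List.replicate nums.length (-1))).length = nums.length ∧
      (∀ k : Nat, m ≤ k → ((List.range m).foldl (pvPrevStepB nums) (List.replicate nums.length (-1))).getD k (-1) = -1) := by
  intro m
  induction m with
  | zero =>
      intro _
      refine ⟨rfl, ?_, ?_, ?_, by simp, ?_⟩
      · simp only [List.range_zero, List.foldl_nil]
        rw [pvChainP_neg _ _ _ (by omega)]
      · intro k; simp only [List.range_zero, List.foldl_nil]; rw [pv_getD_replicate]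
        split_ifs <;> omega
      · intro k; simp only [List.range_zero, List.foldl_nil]; rw [pv_getD_replicate]
        split_ifs <;> omega
      · intro k _; simp only [List.range_zero, List.foldl_nil]; rw [pv_getD_replicate]
        split_ifs
        · rfl
        · rfl
  | succ m ih =>
      intro hm1
      obtain ⟨hEq, hStk, hwf, hlb, hlen, hdef⟩ := ih (by omega)
      set ps := (List.range m).foldl (pvPrevStepB nums) (List.replicate nums.length (-1)) with hps
      set x := nums.getD m 0 with hx
      set j' := pvJumpP nums ps x ((m : Int) - 1) nums.length with hj'
      have hmlen : m < nums.length := by omega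
      have hj'le : j' ≤ (m : Int) - 1 := pvJumpP_le nums ps x hwf nums.length ((m : Int) - 1)
      have hj'lb : -1 ≤ j' := pvJumpP_lb nums ps x hlb nums.length ((m : Int) - 1) (by omega)
      have hP : (List.range m).foldl (pvStepA nums) (List.replicate nums.length (-1), []) =
          (ps, pvChainP ps ((m : Int) - 1) nums.length) := Prod.ext hEq hStk
      have hstack' : pvPopA nums x (pvChainP ps ((m : Int) - 1) nums.length)
          = pvChainP ps j' nums.length :=
        pvPopA_chainP nums ps x hwf nums.length ((m : Int) - 1) (by omega)
      have hps'A : (match pvChainP ps j' nums.length with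
          | [] => ps
          | j :: _ => ps.set m (j : Int)) = ps.set m j' := by
        by_cases hneg : j' < 0
        · rw [pvChainP_neg _ _ _ hneg]
          have hj'eq : j' = -1 := by omega
          rw [hj'eq]
          conv_rhs => rw [show (-1 : Int) = ps.getD m (-1) from (hdef m le_rfl).symm]
          rw [pv_set_getD_self ps m (-1) (by omega)]
        · obtain ⟨g, hg⟩ : ∃ g, nums.length = g + 1 := ⟨nums.length - 1, by omega⟩
          rw [hg]
          simp only [pvChainP, if_pos (by omega : (0:Int) ≤ j')]
          rw [Int.toNat_of_nonneg (by omega : (0:Int) ≤ j')]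
      have hB : (List.range (m + 1)).foldl (pvPrevStepB nums) (List.replicate nums.length (-1))
          = ps.set m j' := by
        rw [List.range_succ, List.foldl_append]
        simp only [List.foldl_cons, List.foldl_nil, ← hps]
        rfl
      have hA : (List.range (m + 1)).foldl (pvStepA nums) (List.replicate nums.length (-1), [])
          = (ps.set m j', m :: pvChainP ps j' nums.length) := by
        rw [List.range_succ, List.foldl_append, hP]
        simp only [List.foldl_cons, List.foldl_nil, pvStepA, ← hx]
        rw [hstack', hps'A]
      have hchain' : pvChainP (ps.set m j') ((m : Int) + 1 - 1) nums.length
          = m :: pvChainP ps j' nums.length := by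
        have hm0 : ((m : Int) + 1 - 1) = (m : Int) := by ring
        rw [hm0, pvChainP_unfold (ps.set m j') (m : Int) nums.length (by omega) (by omega),
          Int.toNat_natCast, pv_getD_set_self ps m j' (-1) (by omega),
          pvChainP_set ps m j' hwf (nums.length - 1) j' (by omega),
          pvChainP_congr ps hwf (nums.length - 1) nums.length j' (by omega) (by omega)]
      rw [hB, hA]
      refine ⟨rfl, ?_, ?_, ?_, by simp [List.length_set, hlen], ?_⟩
      · have : ((m + 1 : Nat) : Int) - 1 = (m : Int) + 1 - 1 := by push_cast; ring
        rw [this, hchain']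
      · intro k
        by_cases hk : k = m
        · subst hk; rw [pv_getD_set_self ps k j' (-1) (by omega)]; omega
        · rw [pv_getD_set_ne ps m k j' (-1) (fun hh => hk hh.symm)]; exact hwf k
      · intro k
        by_cases hk : k = m
        · subst hk; rw [pv_getD_set_self ps k j' (-1) (by omega)]; omega
        · rw [pv_getD_set_ne ps m k j' (-1) (fun hh => hk hh.symm)]; exact hlb k
      · intro k hk
        rw [pv_getD_set_ne ps m k j' (-1) (by omega)]
        exact hdef k (by omega)

-- backward-pass invariant, by induction on the number d of processed indices n-1 … m
theorem pvNextPass_inv (nums : List Int) :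
    ∀ (d m : Nat), m + d = nums.length →
      ((((List.range' m d).reverse.foldl (pvStepA nums)
            (List.replicate nums.length ((nums.length : Int)), [])).1
          = (List.range' m d).reverse.foldl (pvNextStepB nums)
              (List.replicate nums.length ((nums.length : Int)))) ∧
      (((List.range' m d).reverse.foldl (pvStepA nums)
            (List.replicate nums.length ((nums.length : Int)), [])).2
          = pvChainN ((List.range' m d).reverse.foldl (pvNextStepB nums)
                (List.replicate nums.length ((nums.length : Int)))) nums.length (m : Int) nums.length) ∧
      (∀ k : Nat, k < nums.length →
          (k : Int) < ((List.range' m d).reverse.foldl (pvNextStepB nums)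
              (List.replicate nums.length ((nums.length : Int)))).getD k (nums.length : Int)) ∧
      (∀ k : Nat, ((List.range' m d).reverse.foldl (pvNextStepB nums)
              (List.replicate nums.length ((nums.length : Int)))).getD k (nums.length : Int) ≤ (nums.length : Int)) ∧
      ((List.range' m d).reverse.foldl (pvNextStepB nums)
              (List.replicate nums.length ((nums.length : Int)))).length = nums.length ∧
      (∀ k : Nat, k < m → ((List.range' m d).reverse.foldl (pvNextStepB nums)
              (List.replicate nums.length ((nums.length : Int)))).getD k (nums.length : Int) = (nums.length : Int))) := by
  intro d
  induction d with
  | zero =>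
      intro m hm
      refine ⟨rfl, ?_, ?_, ?_, by simp, ?_⟩
      · simp only [List.range', List.reverse_nil, List.foldl_nil]
        rw [pvChainN_big _ _ _ _ (by omega)]
      · intro k hk; simp only [List.range', List.reverse_nil, List.foldl_nil]
        rw [pv_getD_replicate]; split_ifs; omega
      · intro k; simp only [List.range', List.reverse_nil, List.foldl_nil]
        rw [pv_getD_replicate]; split_ifs <;> omega
      · intro k _; simp only [List.range', List.reverse_nil, List.foldl_nil]
        rw [pv_getD_replicate]; split_ifs
        · rfl
        · rfl
  | succ d ih =>
      intro m hm
      obtain ⟨hEq, hStk, hub, hub2, hlen, hdef⟩ := ih (m + 1) (by omega)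
      set ns := (List.range' (m + 1) d).reverse.foldl (pvNextStepB nums)
          (List.replicate nums.length ((nums.length : Int))) with hns
      set x := nums.getD m 0 with hx
      set j' := pvJumpN nums ns x ((m : Int) + 1) nums.length with hj'
      have hmlen : m < nums.length := by omega
      have hj'ge : (m : Int) + 1 ≤ j' := pvJumpN_ge nums ns x hub nums.length ((m : Int) + 1) (by omega)
      have hj'le : j' ≤ (nums.length : Int) := pvJumpN_le nums ns x hub2 nums.length ((m : Int) + 1) (by omega)
      have hP : (List.range' (m + 1) d).reverse.foldl (pvStepA nums)
            (List.replicate nums.length ((nums.length : Int)), []) =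
          (ns, pvChainN ns nums.length ((m + 1 : Nat) : Int) nums.length) := Prod.ext hEq hStk
      have hcast : (((m + 1 : Nat)) : Int) = (m : Int) + 1 := by push_cast; ring
      have hstack' : pvPopA nums x (pvChainN ns nums.length ((m : Int) + 1) nums.length)
          = pvChainN ns nums.length j' nums.length :=
        pvPopA_chainN nums ns x hub nums.length ((m : Int) + 1) (by omega) (by omega)
      have hns'A : (match pvChainN ns nums.length j' nums.length with
          | [] => ns
          | j :: _ => ns.set m (j : Int)) = ns.set m j' := by
        by_cases hbig : (nums.length : Int) ≤ j'
        · rw [pvChainN_big _ _ _ _ hbig]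
          have hj'eq : j' = (nums.length : Int) := by omega
          rw [hj'eq]
          conv_rhs => rw [show ((nums.length : Int)) = ns.getD m (nums.length : Int) from
            (hdef m (by omega)).symm]
          rw [pv_set_getD_self ns m (nums.length : Int) (by omega)]
        · obtain ⟨g, hg⟩ : ∃ g, nums.length = g + 1 := ⟨nums.length - 1, by omega⟩
          rw [hg]
          simp only [pvChainN, if_pos (show j' < ((g + 1 : Nat) : Int) from by rw [← hg]; omega)]
          rw [Int.toNat_of_nonneg (by omega : (0:Int) ≤ j')]
      have hrange : List.range' m (d + 1) = m :: List.range' (m + 1) d := by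
        rw [List.range'_succ]
      have hB : (List.range' m (d + 1)).reverse.foldl (pvNextStepB nums)
            (List.replicate nums.length ((nums.length : Int)))
          = ns.set m j' := by
        rw [hrange, List.reverse_cons, List.foldl_append]
        simp only [List.foldl_cons, List.foldl_nil, ← hns]
        rfl
      have hA : (List.range' m (d + 1)).reverse.foldl (pvStepA nums)
            (List.replicate nums.length ((nums.length : Int)), [])
          = (ns.set m j', m :: pvChainN ns nums.length j' nums.length) := by
        rw [hrange, List.reverse_cons, List.foldl_append, hP]
        simp only [List.foldl_cons, List.foldl_nil, pvStepA, ← hx]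
        rw [hcast, hstack', hns'A]
      have hchain' : pvChainN (ns.set m j') nums.length (m : Int) nums.length
          = m :: pvChainN ns nums.length j' nums.length := by
        rw [pvChainN_unfold (ns.set m j') nums.length (m : Int) nums.length (by omega) (by omega),
          Int.toNat_natCast, pv_getD_set_self ns m j' (nums.length : Int) (by omega),
          pvChainN_set ns nums.length m j' hub (nums.length - 1) j' (by omega),
          pvChainN_congr ns nums.length hub (nums.length - 1) nums.length j' (by omega) (by omega)
            (by omega)]
      rw [hB, hA]
      refine ⟨rfl, hchain'.symm, ?_, ?_, by simp [List.length_set, hlen], ?_⟩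
      · intro k hk
        by_cases hkm : k = m
        · subst hkm; rw [pv_getD_set_self ns k j' (nums.length : Int) (by omega)]; omega
        · rw [pv_getD_set_ne ns m k j' (nums.length : Int) (fun hh => hkm hh.symm)]
          exact hub k hk
      · intro k
        by_cases hkm : k = m
        · subst hkm; rw [pv_getD_set_self ns k j' (nums.length : Int) (by omega)]; omega
        · rw [pv_getD_set_ne ns m k j' (nums.length : Int) (fun hh => hkm hh.symm)]
          exact hub2 k
      · intro k hk
        rw [pv_getD_set_ne ns m k j' (nums.length : Int) (by omega)]
        exact hdef k (by omega)

-- the fill fold preserves length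
theorem pv_foldl_set_length (g : List Int → Nat → Int) :
    ∀ (is : List Nat) (l : List Int),
      (is.foldl (fun r i => r.set i (g r i)) l).length = l.length := by
  intro is
  induction is with
  | nil => intro l; rfl
  | cons i is ih => intro l; simp only [List.foldl_cons]; rw [ih]; simp

theorem pvFill_length : ∀ (is : List Nat) (l : List Int),
    (is.foldl pvFillStepA l).length = l.length :=
  pv_foldl_set_length (fun r i => max (r.getD i 0) (r.getD (i + 1) 0))

theorem pv_bucket_fold_length (nums prevS nextS : List Int) :
    ∀ (is : List Nat) (r : List Int),
      (is.foldl (pvBucketStep nums prevS nextS) r).length = r.length := by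
  intro is
  induction is with
  | nil => intro r; rfl
  | cons i is ih => intro r; simp only [List.foldl_cons]; rw [ih]; simp [pvBucketStep]

theorem pvBuckets_length (nums prevS nextS : List Int) :
    (pvBuckets nums prevS nextS).length = nums.length := by
  unfold pvBuckets
  rw [pv_bucket_fold_length]
  simp

def pvFill (l : List Int) : List Int :=
  (List.range (l.length - 1)).reverse.foldl pvFillStepA l

theorem pv_fill_shift : ∀ (is : List Nat) (x : Int) (l : List Int),
    (is.map (fun i => 1 + i)).foldl pvFillStepA (x :: l) = x :: is.foldl pvFillStepA l := by
  intro is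
  induction is with
  | nil => intro x l; rfl
  | cons i is ih =>
      intro x l
      simp only [List.map_cons, List.foldl_cons]
      rw [show pvFillStepA (x :: l) (1 + i) = x :: pvFillStepA l i from by
        simp [pvFillStepA, Nat.add_comm 1 i, List.getD_eq_getElem?_getD]]
      exact ih x (pvFillStepA l i)

theorem pvFill_cons (x : Int) (l : List Int) :
    pvFill (x :: l) = (match pvFill l with | [] => x | y :: _ => max x y) :: pvFill l := by
  cases l with
  | nil => rfl
  | cons a l₂ =>
      have hL : (x :: a :: l₂).length - 1 = (a :: l₂).length := by simp
      have hL2 : (a :: l₂).length = ((a :: l₂).length - 1) + 1 := by simp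
      have hrange : List.range ((a :: l₂).length)
          = 0 :: (List.range ((a :: l₂).length - 1)).map (fun i => 1 + i) := by
        conv_lhs => rw [List.range_eq_range', hL2, List.range'_succ, List.range'_eq_map_range]
      have hF : pvFill (a :: l₂) ≠ [] := by
        have := pvFill_length (List.range ((a :: l₂).length - 1)).reverse (a :: l₂)
        intro hc
        rw [pvFill] at hc
        rw [hc] at this
        simp at this
      unfold pvFill
      rw [hL, hrange, List.reverse_cons, List.foldl_append, ← List.map_reverse, pv_fill_shift]
      simp only [List.foldl_cons, List.foldl_nil]
      cases hFc : (List.range ((a :: l₂).length - 1)).reverse.foldl pvFillStepA (a :: l₂) with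
      | nil => exact absurd (by rw [pvFill, hFc]) hF
      | cons y t =>
          rw [show pvFillStepA (x :: y :: t) 0 = max x y :: y :: t from by
            simp [pvFillStepA, List.getD_eq_getElem?_getD]]

theorem pv_scan_shape : ∀ (rs : List Int) (m : Int) (o : List Int),
    ∃ m' o', rs.foldl pvScanStepB (some m, o ++ [m]) = (some m', o' ++ [m']) := by
  intro rs
  induction rs with
  | nil => intro m o; exact ⟨m, o, rfl⟩
  | cons v rs ih =>
      intro m o
      rw [List.foldl_cons, show pvScanStepB (some m, o ++ [m]) v
          = (some (max m v), (o ++ [m]) ++ [max m v]) from rfl]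
      exact ih (max m v) (o ++ [m])

theorem pv_scan_shape0 : ∀ rs : List Int,
    rs = [] ∨ ∃ m' o', rs.foldl pvScanStepB (none, []) = (some m', o' ++ [m']) := by
  intro rs
  cases rs with
  | nil => exact Or.inl rfl
  | cons v rs =>
      refine Or.inr ?_
      rw [List.foldl_cons, show pvScanStepB (none, ([] : List Int)) v = (some v, [] ++ [v]) from rfl]
      exact pv_scan_shape rs v []

theorem pvScanB_cons (x : Int) (l : List Int) :
    pvScanB (x :: l) = (match pvScanB l with | [] => x | y :: _ => max y x) :: pvScanB l := by
  unfold pvScanB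
  rw [List.reverse_cons, List.foldl_append]
  simp only [List.foldl_cons, List.foldl_nil]
  rcases pv_scan_shape0 l.reverse with h | ⟨m, o, h⟩
  · have hl : l = [] := by simpa using congrArg List.reverse h
    subst hl
    rfl
  · rw [h, show pvScanStepB (some m, o ++ [m]) x = (some (max m x), (o ++ [m]) ++ [max m x]) from rfl]
    simp [List.reverse_append]

theorem pvFill_eq_scan : ∀ l : List Int, pvFill l = pvScanB l := by
  intro l
  induction l with
  | nil => rfl
  | cons x l ih =>
      rw [pvFill_cons, pvScanB_cons, ih]
      cases pvScanB l <;> simp [max_comm]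

-- ===== VERDICT (by name: the statement is the Claim_ definition above) =====
theorem findMaximums_spec : Claim_equal_findMaximums := by
  intro nums _
  unfold Spec_findMaximums
  show findMaximums nums = findMaximums_alt nums
  obtain ⟨hEqP, -, -, -, -, -⟩ := pvPrevPass_inv nums nums.length le_rfl
  obtain ⟨hEqN, -, -, -, -, -⟩ := pvNextPass_inv nums nums.length 0 (by omega)
  rw [← List.range_eq_range'] at hEqN
  simp only [findMaximums, findMaximums_alt]
  rw [hEqN, hEqP]
  set b := pvBuckets nums
      ((List.range nums.length).foldl (pvPrevStepB nums) (List.replicate nums.length (-1)))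
      ((List.range nums.length).reverse.foldl (pvNextStepB nums)
        (List.replicate nums.length ((nums.length : Int)))) with hb
  have hlen : nums.length = b.length := (pvBuckets_length _ _ _).symm
  rw [show nums.length - 1 = b.length - 1 from by rw [hlen]]
  exact pvFill_eq_scan b
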